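-- pv_equiv track=rewrite | github.com/SMATousi/Gully_Detection | gully_detection/dataset.py | group_files_by_tile
-- ===== SOURCE A (Python) =====
-- def group_files_by_tile(files):
--     tile_dict = {}
--     for file in files:
--         tile_number = file.split('_')[-1].split('.')[0]
--         if tile_number not in tile_dict:
--             tile_dict[tile_number] = []
--         tile_dict[tile_number].append(file)
--     # Only include complete groups
--     return [tile for tile in tile_dict.values() if len(tile) == 6]
-- ===== SOURCE B (Python) =====
-- def group_files_by_tile(files):
--     # Two-pass: count tile numbers first, then collect only files whose
--     # tile number is complete (count 6) into an order-preserving dict.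
--     tiles = [f.split('_')[-1].split('.')[0] for f in files]
--     counts = {}
--     for t in tiles:
--         counts[t] = counts.get(t, 0) + 1
--     result = {}
--     for f, t in zip(files, tiles):
--         if counts[t] == 6:
--             result.setdefault(t, []).append(f)
--     return list(result.values())
-- ===== Notes on version B (the rewrite author's own statement) =====
-- stated objective: alternative
-- what changed: Replaces A's single-pass dict-bucketing (append every file into a dict of lists, then filter the values by length 6) with a count-then-collect two-pass decomposition: a frequency table of tile numbers is built first, and a second pass collects only files whose tile number occurs exactly 6 times, so incomplete groups are never materialised.
import Mathlib
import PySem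

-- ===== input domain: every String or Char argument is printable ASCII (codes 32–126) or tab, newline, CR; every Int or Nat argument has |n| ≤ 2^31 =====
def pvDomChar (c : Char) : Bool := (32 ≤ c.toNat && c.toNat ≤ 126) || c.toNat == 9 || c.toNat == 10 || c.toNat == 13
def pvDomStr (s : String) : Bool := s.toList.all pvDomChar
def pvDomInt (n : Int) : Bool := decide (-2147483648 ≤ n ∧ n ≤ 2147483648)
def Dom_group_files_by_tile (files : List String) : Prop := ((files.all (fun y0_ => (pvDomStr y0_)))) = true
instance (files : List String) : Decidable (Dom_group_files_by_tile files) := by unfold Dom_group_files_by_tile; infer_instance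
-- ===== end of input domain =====

-- B replaces A's bucket-everything-then-filter with a count-then-collect two-pass decomposition;
-- same return value on every input (A is total).

-- ===== PORT A =====
-- shared helper: file.split('_')[-1].split('.')[0]
-- split? is `some` because the separators are nonempty, and the list it returns is nonempty,
-- so the .getD defaults are unreachable
def tileOf (file : String) : String :=
  let parts := (PySem.Str.split? file "_").getD []
  let last := PySem.List.pyGetD parts (-1) ""
  let parts2 := (PySem.Str.split? last ".").getD []
  PySem.List.pyGetD parts2 0 ""

def group_files_by_tile (files : List String) : List (List String) :=
  let tile_dict := files.foldl (fun d file =>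
    let tile_number := tileOf file
    let d := if d.contains tile_number = false then d.insert tile_number ([] : List String) else d
    -- tile_dict[tile_number].append(file): the key is present here, so modify with default [] is exact
    d.modify tile_number [] (fun l => l ++ [file])) PySem.Dict.empty
  tile_dict.values.filter (fun tile => tile.length == 6)

-- ===== PORT B =====
def group_files_by_tile_alt (files : List String) : List (List String) :=
  let tiles := files.map (fun f => tileOf f)
  -- counts[t] = counts.get(t, 0) + 1
  let counts := tiles.foldl (fun d t => d.insert t (d.getD t 0 + 1)) (PySem.Dict.empty : PySem.Dict String Int)
  -- result.setdefault(t, []).append(f): the key is present after setdefault, so modify with default [] is exact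
  let result := (files.zip tiles).foldl (fun r p =>
    if counts.getD p.2 0 == 6 then (r.setdefault p.2 ([] : List String)).modify p.2 [] (fun l => l ++ [p.1])
    else r) PySem.Dict.empty
  result.values

-- ===== PRECONDITION & SPEC =====
def Spec_group_files_by_tile (files : List String) (out : List (List String)) : Prop := out = group_files_by_tile_alt files
instance (files : List String) (out : List (List String)) : Decidable (Spec_group_files_by_tile files out) := by unfold Spec_group_files_by_tile; infer_instance

-- ===== CLAIM (what is proved, stated in full; the proofs are below) =====
def Claim_equal_group_files_by_tile : Prop := ∀ (files : List String), Dom_group_files_by_tile files → Spec_group_files_by_tile files (group_files_by_tile files)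

-- ===== LEMMAS AND PROOFS =====

-- "insert [] if absent / setdefault, then append" equals a single modify with default []
lemma setdefault_modify (r : PySem.Dict String (List String)) (t f : String) :
    (r.setdefault t ([] : List String)).modify t [] (fun l => l ++ [f]) =
    r.modify t [] (fun l => l ++ [f]) := by
  by_cases h : r.contains t
  · rw [PySem.Dict.setdefault_of_contains r ([] : List String) h]
  · rw [PySem.Dict.setdefault_of_not_contains r ([] : List String) (by simpa using h)]
    simp [PySem.Dict.modify, PySem.Dict.insert_insert_self, PySem.Dict.getD_insert_self,
      PySem.Dict.getD_of_not_contains r ([] : List String) (by simpa using h)]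

lemma stepA_eq_modify (d : PySem.Dict String (List String)) (f : String) :
    (let t := tileOf f
     let d' := if d.contains t = false then d.insert t ([] : List String) else d
     d'.modify t [] (fun l => l ++ [f])) =
    d.modify (tileOf f) [] (fun l => l ++ [f]) := by
  by_cases h : d.contains (tileOf f)
  · simp [h]
  · -- reduce the if, then reuse the setdefault argument
    simp only []
    rw [if_pos (by simpa using h), ← PySem.Dict.setdefault_of_not_contains d ([] : List String) (by simpa using h),
      setdefault_modify]

lemma filter_pairs_map (files : List String) (t : String) :
    (((files.map (fun f => (tileOf f, f))).filter (fun p => p.1 == t)).map (fun p => p.2)) =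
    files.filter (fun f => tileOf f == t) := by
  rw [List.filter_map, List.map_map]
  simp [Function.comp_def]

lemma zip_map_self (files : List String) :
    files.zip (files.map (fun f => tileOf f)) = files.map (fun f => (f, tileOf f)) := by
  induction files with
  | nil => rfl
  | cons x xs ih => simp [List.zip_cons_cons, ih]

-- the grouping dict's values, for any file list: one group per distinct tile, in first-occurrence order
lemma dict_values (fs : List String) :
    ((fs.map (fun f => (tileOf f, f))).foldl
        (fun d p => d.modify p.1 [] (fun l => l ++ [p.2])) PySem.Dict.empty).values =
    (PySem.Set.ofList (fs.map (fun f => tileOf f))).map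
      (fun t => fs.filter (fun f => tileOf f == t)) := by
  set pairs := fs.map (fun f => (tileOf f, f)) with hpairsdef
  set D := pairs.foldl (fun d p => d.modify p.1 [] (fun l => l ++ [p.2])) PySem.Dict.empty with hD
  have hkeys : D.keys = PySem.Set.ofList (fs.map (fun f => tileOf f)) := by
    rw [hD, PySem.Dict.keys_foldl_modify_key]
    simp [hpairsdef, PySem.Dict.keys_empty, PySem.Set.update_nil_left, List.map_map,
      Function.comp_def]
  have hnodup : D.keys.Nodup := by
    rw [hD]
    exact PySem.Dict.nodup_keys_foldl_modify_key _ _ _ _ _ (by simp [PySem.Dict.keys_empty])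
  have hgetD : ∀ t, D.getD t [] = fs.filter (fun f => tileOf f == t) := by
    intro t
    rw [hD, PySem.Dict.getD_foldl_modify_append]
    simp [filter_pairs_map fs t, hpairsdef]
  rw [PySem.Dict.values_eq_map_keys D hnodup [], hkeys]
  exact List.map_congr_left (fun t _ => hgetD t)

lemma count_int_beq (n : Nat) : (((n : Int)) == (6 : Int)) = (n == 6) := by
  by_cases h : n = 6 <;> simp [h]
  omega

lemma grp_len (fs : List String) (t : String) :
    ((fs.filter (fun f => tileOf f == t)).length == 6) = ((fs.map (fun f => tileOf f)).count t == 6) := by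
  rw [List.count_eq_countP, List.countP_map, ← List.countP_eq_length_filter]
  rfl

lemma filter_add (s : PySem.Set String) (x : String) (c : String → Bool) :
    (PySem.Set.add s x).filter c = if c x then PySem.Set.add (s.filter c) x else s.filter c := by
  by_cases hm : x ∈ s
  all_goals by_cases hc : c x = true
  · rw [PySem.Set.add_of_mem hm, if_pos hc,
      PySem.Set.add_of_mem (List.mem_filter.mpr ⟨hm, hc⟩)]
  · rw [PySem.Set.add_of_mem hm, if_neg hc]
  · rw [PySem.Set.add_of_not_mem hm, if_pos hc, List.filter_append,
      PySem.Set.add_of_not_mem (fun hx => hm (List.mem_filter.mp hx).1)]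
    simp [hc]
  · rw [PySem.Set.add_of_not_mem hm, if_neg hc, List.filter_append]
    simp [hc]

lemma update_filter (c : String → Bool) : ∀ (l : List String) (s : PySem.Set String),
    (PySem.Set.update s l).filter c = PySem.Set.update (s.filter c) (l.filter c)
  | [], s => by simp [PySem.Set.update_nil]
  | x :: xs, s => by
    rw [PySem.Set.update_cons, update_filter c xs (PySem.Set.add s x), filter_add]
    by_cases hc : c x = true
    · rw [if_pos hc, List.filter_cons_of_pos hc, PySem.Set.update_cons]
    · rw [if_neg hc, List.filter_cons_of_neg (by simpa using hc)]

lemma ofList_filter (c : String → Bool) (l : List String) :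
    PySem.Set.ofList (l.filter c) = (PySem.Set.ofList l).filter c := by
  rw [← PySem.Set.update_nil_left, ← PySem.Set.update_nil_left, update_filter]
  rfl

-- ===== VERDICT (by name: the statement is the Claim_ definition above) =====
theorem group_files_by_tile_spec : Claim_equal_group_files_by_tile := by
  intro files _
  unfold Spec_group_files_by_tile group_files_by_tile group_files_by_tile_alt
  dsimp only
  -- abbreviations
  set tiles := files.map (fun f => tileOf f) with htiles
  set c : String → Bool := fun t => tiles.count t == 6 with hc
  set grp : String → List String := fun t => files.filter (fun f => tileOf f == t) with hgrp
  -- ===== A's side =====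
  have hfunA : (fun (d : PySem.Dict String (List String)) file =>
      let tile_number := tileOf file
      let d := if d.contains tile_number = false then d.insert tile_number ([] : List String) else d
      d.modify tile_number [] (fun l => l ++ [file])) =
      (fun d f => d.modify (tileOf f) [] (fun l => l ++ [f])) := by
    funext d f; exact stepA_eq_modify d f
  have hfoldA : (files.map (fun f => (tileOf f, f))).foldl
      (fun d p => d.modify p.1 [] (fun l => l ++ [p.2])) PySem.Dict.empty
      = files.foldl (fun d f => d.modify (tileOf f) [] (fun l => l ++ [f])) PySem.Dict.empty := by
    rw [List.foldl_map]
  have hA : (files.foldl (fun d file =>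
      let tile_number := tileOf file
      let d := if d.contains tile_number = false then d.insert tile_number ([] : List String) else d
      d.modify tile_number [] (fun l => l ++ [file])) PySem.Dict.empty).values.filter
        (fun tile => tile.length == 6)
      = ((PySem.Set.ofList tiles).filter c).map grp := by
    rw [hfunA, ← hfoldA, dict_values, List.filter_map]
    congr 1
    apply List.filter_congr
    intro t _
    simp only [Function.comp_def, hc, htiles]
    exact grp_len files t
  rw [hA]
  -- ===== B's side =====
  -- the counter really counts
  have hcounts : ∀ t, (tiles.foldl (fun d t => d.insert t (d.getD t 0 + 1))
      (PySem.Dict.empty : PySem.Dict String Int)).getD t 0 = ((tiles.count t : Int)) := by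
    intro t
    rw [PySem.Dict.getD_foldl_insert_add_one, PySem.Dict.getD_empty, zero_add]
  -- B's collecting step, with the counter lookup rewritten to the count predicate
  have hfunB : (fun (r : PySem.Dict String (List String)) (p : String × String) =>
      if (tiles.foldl (fun d t => d.insert t (d.getD t 0 + 1))
          (PySem.Dict.empty : PySem.Dict String Int)).getD p.2 0 == 6
      then (r.setdefault p.2 ([] : List String)).modify p.2 [] (fun l => l ++ [p.1])
      else r) =
      (fun r p => if c p.2 then r.modify p.2 [] (fun l => l ++ [p.1]) else r) := by
    funext r p
    rw [hcounts p.2, count_int_beq, setdefault_modify]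
  -- the guarded fold collects exactly over the kept pairs
  have hzf : ((files.zip tiles).filter (fun p => c p.2)).foldl
      (fun r p => r.modify p.2 [] (fun l => l ++ [p.1])) PySem.Dict.empty
      = (files.zip tiles).foldl
        (fun r p => if c p.2 then r.modify p.2 [] (fun l => l ++ [p.1]) else r) PySem.Dict.empty :=
    List.foldl_filter
  have hZ : (files.zip tiles).filter (fun p => c p.2)
      = (files.filter (fun f => c (tileOf f))).map (fun f => (f, tileOf f)) := by
    rw [htiles, zip_map_self, List.filter_map]
    simp [Function.comp_def]
  have hW : ((files.filter (fun f => c (tileOf f))).map (fun f => (f, tileOf f))).foldl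
      (fun r p => r.modify p.2 [] (fun l => l ++ [p.1])) PySem.Dict.empty
      = ((files.filter (fun f => c (tileOf f))).map (fun f => (tileOf f, f))).foldl
        (fun d p => d.modify p.1 [] (fun l => l ++ [p.2])) PySem.Dict.empty := by
    rw [List.foldl_map, List.foldl_map]
  have hkeys : (files.filter (fun f => c (tileOf f))).map (fun f => tileOf f)
      = tiles.filter c := by
    rw [htiles, List.filter_map]
    simp [Function.comp_def]
  have hB : ((files.zip tiles).foldl (fun r p =>
      if (tiles.foldl (fun d t => d.insert t (d.getD t 0 + 1))
          (PySem.Dict.empty : PySem.Dict String Int)).getD p.2 0 == 6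
      then (r.setdefault p.2 ([] : List String)).modify p.2 [] (fun l => l ++ [p.1])
      else r) PySem.Dict.empty).values
      = ((PySem.Set.ofList tiles).filter c).map grp := by
    rw [hfunB, ← hzf, hZ, hW, dict_values, hkeys, ofList_filter]
    -- inside each kept group the count condition is redundant
    apply List.map_congr_left
    intro t ht
    have hct : c t = true := (List.mem_filter.mp ht).2
    rw [hgrp]
    simp only [List.filter_filter]
    apply List.filter_congr
    intro f _
    by_cases hft : tileOf f = t
    · simp [hft, hct]
    · simp [hft]
  rw [hB]
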